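-- pv_equiv track=rewrite | github.com/pronoym99/python_in_R | dist_allmods.py | continuous_position_wise_grouping
-- ===== SOURCE A (Python) =====
-- def continuous_position_wise_grouping(a):
--     buckets = []
--     start = 0
--     is_zero_bucket = a[0] == 0
--     for i, num in enumerate(a[1:], start=1):
--         if num == 0 and not is_zero_bucket:
--             end = i
--             is_zero_bucket = True
--             buckets.append((start, end))
--             start = end
--         elif num != 0 and is_zero_bucket:
--             end = i
--             is_zero_bucket = False
--             buckets.append((start, end))
--             start = end
--     if is_zero_bucket:
--         end = len(a)
--         buckets.append((start, end))
--     elif not is_zero_bucket and start != len(a):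
--         end = len(a)
--         buckets.append((start, end))
--     return buckets
-- ===== SOURCE B (Python) =====
-- def continuous_position_wise_grouping(a):
--     # Phase 1: lengths of the maximal runs of equal zero-ness, left to right.
--     lengths = []
--     last = None
--     run = 0
--     for x in a:
--         z = (x == 0)
--         if z == last:
--             run += 1
--         else:
--             if run:
--                 lengths.append(run)
--             last, run = z, 1
--     if run:
--         lengths.append(run)
--     # Phase 2: turn run lengths into index ranges.
--     out = []
--     start = 0
--     for L in lengths:
--         out.append((start, start + L))
--         start += L
--     return out
-- ===== Notes on version B (the rewrite author's own statement) =====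
-- stated objective: simpler
-- what changed: B first run-length-encodes the zero/non-zero pattern, then turns the lengths into ranges in a second pass, replacing A's index-boundary state machine with its two final conditional appends.
import Mathlib
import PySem

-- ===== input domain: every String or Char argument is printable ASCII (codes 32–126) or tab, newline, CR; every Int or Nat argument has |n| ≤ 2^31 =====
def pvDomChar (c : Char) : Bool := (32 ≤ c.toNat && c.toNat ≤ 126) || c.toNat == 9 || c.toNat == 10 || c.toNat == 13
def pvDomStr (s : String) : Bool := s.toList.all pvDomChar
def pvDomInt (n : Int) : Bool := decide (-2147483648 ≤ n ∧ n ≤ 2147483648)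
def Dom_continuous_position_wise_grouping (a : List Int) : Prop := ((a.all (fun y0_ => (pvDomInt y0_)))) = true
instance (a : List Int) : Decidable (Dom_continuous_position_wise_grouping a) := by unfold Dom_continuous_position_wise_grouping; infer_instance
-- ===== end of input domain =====

-- B replaces A's index-boundary state machine (and its two final conditional appends)
-- by a run-length encoding of the zero/non-zero pattern followed by a second pass
-- turning lengths into ranges (objective: simpler).

-- ===== PORT A =====
-- loop body of `for i, num in enumerate(a[1:], start=1)` (state: buckets, start, is_zero_bucket)
def cpwgStepA (st : List (Int × Int) × Int × Bool) (p : Int × Nat) : List (Int × Int) × Int × Bool :=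
  let num := p.1
  let i : Int := (p.2 : Int)
  if num == 0 && !st.2.2 then (st.1 ++ [(st.2.1, i)], i, true)
  else if num != 0 && st.2.2 then (st.1 ++ [(st.2.1, i)], i, false)
  else st

def continuous_position_wise_grouping (a : List Int) : List (Int × Int) :=
  -- Python reads the first element here (IndexError on the empty list, excluded by Pre_); pyGetD is exact there
  let is_zero0 : Bool := PySem.List.pyGetD a 0 0 == 0
  let st := ((a.drop 1).zipIdx 1).foldl cpwgStepA ([], 0, is_zero0)
  let n : Int := (a.length : Int)
  if st.2.2 then st.1 ++ [(st.2.1, n)]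
  else if st.2.1 != n then st.1 ++ [(st.2.1, n)]
  else st.1

-- ===== PORT B =====
-- Phase 1 of Source B: run lengths of equal zero-ness (state: last, run), after the first element
def cpwgRuns (last : Bool) (run : Int) : List Int → List Int
  | [] => [run]
  | x :: xs => if (x == 0) == last then cpwgRuns last (run + 1) xs
               else run :: cpwgRuns (x == 0) 1 xs

def continuous_position_wise_grouping_alt (a : List Int) : List (Int × Int) :=
  match a with
  | [] => []   -- run = 0 stays 0: nothing appended, both passes empty
  | x :: xs =>
    let lengths := cpwgRuns (x == 0) 1 xs
    -- Phase 2 of Source B: lengths → ranges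
    (lengths.foldl (fun (st : List (Int × Int) × Int) L =>
        (st.1 ++ [(st.2, st.2 + L)], st.2 + L)) ([], 0)).1

-- ===== PRECONDITION & SPEC =====
-- Pre_ excludes only the empty list, on which A raises IndexError reading the first element.
def Pre_continuous_position_wise_grouping (a : List Int) : Prop := a ≠ []
instance (a : List Int) : Decidable (Pre_continuous_position_wise_grouping a) := by
  unfold Pre_continuous_position_wise_grouping; infer_instance
def pvWitness_continuous_position_wise_grouping : List Int := [0, 3, 4, 0]

def Spec_continuous_position_wise_grouping (a : List Int) (out : List (Int × Int)) : Prop := out = continuous_position_wise_grouping_alt a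
instance (a : List Int) (out : List (Int × Int)) : Decidable (Spec_continuous_position_wise_grouping a out) := by unfold Spec_continuous_position_wise_grouping; infer_instance

-- ===== CLAIM (what is proved, stated in full; the proofs are below) =====
def Claim_equal_continuous_position_wise_grouping : Prop := ∀ (a : List Int), Dom_continuous_position_wise_grouping a → Pre_continuous_position_wise_grouping a → Spec_continuous_position_wise_grouping a (continuous_position_wise_grouping a)
-- ===== LEMMAS AND PROOFS =====

-- ranges built by B's second pass, starting at s
def cpwgRangesFrom (s : Int) : List Int → List (Int × Int)
  | [] => []
  | L :: ls => (s, s + L) :: cpwgRangesFrom (s + L) ls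

lemma cpwgPhase2 (ls : List Int) (acc : List (Int × Int)) (s : Int) :
    (ls.foldl (fun (st : List (Int × Int) × Int) L =>
        (st.1 ++ [(st.2, st.2 + L)], st.2 + L)) (acc, s)).1
      = acc ++ cpwgRangesFrom s ls := by
  induction ls generalizing acc s with
  | nil => simp [cpwgRangesFrom]
  | cons L ls ih => simp [cpwgRangesFrom, ih]

-- main loop invariant: A's loop + unconditional final append = B's ranges
lemma cpwgMain (xs : List Int) : ∀ (i : Nat) (s : Int) (z : Bool) (b : List (Int × Int)),
    s < (i : Int) →
    (let st := ((xs.zipIdx i).foldl cpwgStepA (b, s, z));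
     st.2.1 < (i : Int) + xs.length ∧
     st.1 ++ [(st.2.1, (i : Int) + xs.length)]
       = b ++ cpwgRangesFrom s (cpwgRuns z ((i : Int) - s) xs)) := by
  induction xs with
  | nil =>
    intro i s z b hs
    simp only [List.zipIdx_nil, List.foldl_nil, List.length_nil, cpwgRuns, cpwgRangesFrom]
    constructor
    · simpa using hs
    · simp
  | cons x xs ih =>
    intro i s z b hs
    simp only [List.zipIdx_cons, List.foldl_cons, List.length_cons]
    by_cases hx : (x == 0) = z
    · have hstep : cpwgStepA (b, s, z) (x, i) = (b, s, z) := by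
        cases z <;> simp_all [cpwgStepA]
      rw [hstep]
      obtain ⟨h1, h2⟩ := ih (i + 1) s z b (by push_cast; omega)
      push_cast at h1 h2 ⊢
      refine ⟨by omega, ?_⟩
      simp only [cpwgRuns, hx, beq_self_eq_true, if_true]
      have harg : (i : Int) + 1 - s = (i : Int) - s + 1 := by ring
      rw [harg] at h2
      have hlen : (i : Int) + (↑xs.length + 1) = (i : Int) + 1 + ↑xs.length := by ring
      rw [hlen]
      exact h2
    · have h0 : ((x == 0) : Bool) = !z := by cases z <;> cases hb : (x == 0) <;> simp_all
      have hstep : cpwgStepA (b, s, z) (x, i) = (b ++ [(s, (i : Int))], (i : Int), !z) := by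
        cases z <;> cases hb : (x == 0) <;> simp_all [cpwgStepA]
      rw [hstep]
      obtain ⟨h1, h2⟩ := ih (i + 1) (i : Int) (!z) (b ++ [(s, (i : Int))]) (by push_cast; omega)
      push_cast at h1 h2 ⊢
      refine ⟨by omega, ?_⟩
      simp only [cpwgRuns, h0, Bool.not_beq_self, Bool.false_eq_true, if_false]
      have harg : (i : Int) + 1 - (i : Int) = 1 := by ring
      rw [harg] at h2
      have hlen : (i : Int) + (↑xs.length + 1) = (i : Int) + 1 + ↑xs.length := by ring
      rw [hlen, h2]
      simp only [cpwgRangesFrom, List.append_assoc, List.cons_append, List.nil_append]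
      have : s + ((i : Int) - s) = (i : Int) := by ring
      rw [this]

theorem continuous_position_wise_grouping_spec : Claim_equal_continuous_position_wise_grouping := by
  intro a _ hpre
  unfold Spec_continuous_position_wise_grouping
  match a with
  | [] => exact absurd rfl hpre
  | x :: xs =>
    obtain ⟨hlt, heq⟩ := cpwgMain xs 1 0 (x == 0) [] (by norm_num)
    unfold continuous_position_wise_grouping continuous_position_wise_grouping_alt
    simp only [List.drop_one, List.tail_cons, PySem.List.pyGetD_zero_cons, List.length_cons]
    rw [cpwgPhase2]
    push_cast at hlt heq ⊢
    simp only [List.nil_append] at heq ⊢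
    rw [show ((xs.length : Int) + 1) = 1 + (xs.length : Int) by ring]
    split
    · exact heq
    · rw [if_pos (by simp only [bne_iff_ne, ne_eq]; omega)]
      exact heq
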